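-- pv_equiv track=rewrite | github.com/KateFedkova/CDM_Labs | Lab_4.py | form_result
-- ===== SOURCE A (Python) =====
-- def form_result(factors):
--     result = ""
--     list_of_factors = [key for key, value in factors.items()]
--     last_factor = list_of_factors[len(list_of_factors) - 1]
--     for key, value in factors.items():
--         if key == last_factor and value == 1:
--             result += f"{key}"
--         elif key == last_factor:
--             result += f"{key}^{value}"
--         elif value == 1:
--             result += f"{key} * "
--         else:
--             result += f"{key}^{value} * "
--     return result
-- ===== SOURCE B (Python) =====
-- def form_result(factors):
--     tokens = [key if value == 1 else f"{key}^{value}" for key, value in factors.items()]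
--     result = tokens[0]
--     for t in tokens[1:]:
--         result += " * " + t
--     return result
-- ===== Notes on version B (the rewrite author's own statement) =====
-- stated objective: simpler
-- what changed: B formats all tokens in one pass and then joins them with ' * ' separators starting from the first token, instead of A's precomputed last_factor key and four-way is-last branching inside the loop; Pre_ excludes the empty dict, on which both programs raise IndexError, and association lists with duplicate keys, which a Python dict cannot represent.
import Mathlib
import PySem

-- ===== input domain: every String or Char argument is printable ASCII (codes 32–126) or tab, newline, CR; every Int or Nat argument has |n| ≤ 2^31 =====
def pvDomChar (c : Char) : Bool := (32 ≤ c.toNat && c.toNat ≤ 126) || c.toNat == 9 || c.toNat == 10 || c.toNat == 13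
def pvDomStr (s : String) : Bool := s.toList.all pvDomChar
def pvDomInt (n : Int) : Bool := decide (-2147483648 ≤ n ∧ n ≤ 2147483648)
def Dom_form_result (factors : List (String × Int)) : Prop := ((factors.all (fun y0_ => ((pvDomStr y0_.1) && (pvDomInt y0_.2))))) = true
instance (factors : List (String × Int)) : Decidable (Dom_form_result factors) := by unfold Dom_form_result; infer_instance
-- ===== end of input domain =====

-- B builds the list of formatted tokens in one pass and joins them with " * " separators,
-- replacing A's precomputed last key and four-way is-last branching inside its loop.

-- ===== PORT A =====
-- A's loop body: the four-way branch on (key == last_factor, value == 1).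
def formStepA (last_factor : String) (result : String) (kv : String × Int) : String :=
  if kv.1 = last_factor ∧ kv.2 = 1 then result ++ kv.1
  else if kv.1 = last_factor then result ++ kv.1 ++ "^" ++ PySem.Int.toStr kv.2
  else if kv.2 = 1 then result ++ kv.1 ++ " * "
  else result ++ kv.1 ++ "^" ++ PySem.Int.toStr kv.2 ++ " * "

def form_result (factors : List (String × Int)) : String :=
  let list_of_factors := factors.map Prod.fst
  -- list_of_factors[len(list_of_factors) - 1]; `.getD ""` is unreachable under Pre_ (IndexError in Python)
  let last_factor := (PySem.List.pyGet? list_of_factors ((list_of_factors.length : Int) - 1)).getD ""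
  factors.foldl (formStepA last_factor) ""

-- ===== PORT B =====
-- token for one (key, value) pair: key if value == 1 else f"{key}^{value}"
def formTok (kv : String × Int) : String :=
  if kv.2 = 1 then kv.1 else kv.1 ++ "^" ++ PySem.Int.toStr kv.2

def form_result_alt (factors : List (String × Int)) : String :=
  let tokens := factors.map formTok
  -- tokens[0]; `.getD ""` is unreachable under Pre_ (IndexError in Python)
  let result := (PySem.List.pyGet? tokens 0).getD ""
  (tokens.drop 1).foldl (fun r t => r ++ " * " ++ t) result

-- ===== PRECONDITION & SPEC =====
-- Pre_ excludes the empty list, on which both A and B raise IndexError, and association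
-- lists with duplicate keys, which a Python dict (A's and B's actual input) cannot represent.
def Pre_form_result (factors : List (String × Int)) : Prop :=
  factors ≠ [] ∧ (factors.map Prod.fst).Nodup
instance (factors : List (String × Int)) : Decidable (Pre_form_result factors) := by
  unfold Pre_form_result; infer_instance

def pvWitness_form_result : (List (String × Int)) := [("x", 1), ("y", 3)]

def Spec_form_result (factors : List (String × Int)) (out : String) : Prop := out = form_result_alt factors
instance (factors : List (String × Int)) (out : String) : Decidable (Spec_form_result factors out) := by unfold Spec_form_result; infer_instance

-- ===== CLAIM (what is proved, stated in full; the proofs are below) =====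
def Claim_equal_form_result : Prop := ∀ (factors : List (String × Int)), Dom_form_result factors → Pre_form_result factors → Spec_form_result factors (form_result factors)

-- ===== LEMMAS AND PROOFS =====

-- the joined string both programs compute: formTok x₀ ++ " * " ++ formTok x₁ ++ … (nonempty input)
def formJoin : List (String × Int) → String
  | [] => ""
  | [kv] => formTok kv
  | kv :: r :: rs => formTok kv ++ " * " ++ formJoin (r :: rs)

-- the tail of the join: " * " ++ formTok kv for every remaining pair
def formTail : List (String × Int) → String
  | [] => ""
  | kv :: r => " * " ++ formTok kv ++ formTail r

theorem formJoin_cons (x : String × Int) (xs : List (String × Int)) :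
    formJoin (x :: xs) = formTok x ++ formTail xs := by
  induction xs generalizing x with
  | nil => simp [formJoin, formTail]
  | cons y ys ih =>
      simp only [formJoin, formTail, ih y, String.append_assoc]

-- B's assembly loop
theorem foldlB_eq (ts : List (String × Int)) (a : String) :
    (ts.map formTok).foldl (fun r t => r ++ " * " ++ t) a = a ++ formTail ts := by
  induction ts generalizing a with
  | nil => simp [formTail]
  | cons y ys ih =>
      simp only [List.map_cons, List.foldl_cons]
      rw [ih]
      simp [formTail, String.append_assoc]

-- A's loop, given that no key before the last one equals last_factor
theorem foldlA_eq (l : List (String × Int)) (acc : String) (last : String)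
    (hne : l ≠ []) (hlast : (l.getLast hne).1 = last)
    (hdrop : ∀ kv ∈ l.dropLast, kv.1 ≠ last) :
    l.foldl (formStepA last) acc = acc ++ formJoin l := by
  induction l generalizing acc with
  | nil => exact absurd rfl hne
  | cons x xs ih =>
      cases xs with
      | nil =>
          simp only [List.getLast_singleton] at hlast
          by_cases h1 : x.2 = 1
          · simp [formStepA, formJoin, formTok, hlast, h1]
          · simp [formStepA, formJoin, formTok, hlast, h1, String.append_assoc]
      | cons y ys =>
          have hx : x.1 ≠ last := hdrop x (by simp)
          have hstep : formStepA last acc x = acc ++ formTok x ++ " * " := by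
            by_cases h1 : x.2 = 1
            · simp [formStepA, formTok, hx, h1]
            · simp [formStepA, formTok, hx, h1, String.append_assoc]
          have hlast' : ((y :: ys).getLast (by simp)).1 = last := by
            rwa [List.getLast_cons (by simp)] at hlast
          have hdrop' : ∀ kv ∈ (y :: ys).dropLast, kv.1 ≠ last := by
            intro kv hkv
            exact hdrop kv (by simp [List.dropLast_cons₂, hkv])
          rw [List.foldl_cons, hstep, ih _ (by simp) hlast' hdrop']
          simp [formJoin, String.append_assoc]

-- the key of the last pair, as A computes it via indexing
theorem lastFactor_eq (l : List (String × Int)) (hne : l ≠ []) :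
    ((PySem.List.pyGet? (l.map Prod.fst) (((l.map Prod.fst).length : Int) - 1)).getD "")
      = (l.getLast hne).1 := by
  have hmne : l.map Prod.fst ≠ [] := by simpa using hne
  have hlen : 0 < (l.map Prod.fst).length := List.length_pos_of_ne_nil hmne
  have hcast : ((l.map Prod.fst).length : Int) - 1 = (((l.map Prod.fst).length - 1 : Nat) : Int) := by
    omega
  rw [hcast, PySem.List.pyGet?_natCast, ← List.getLast?_eq_getElem?,
    List.getLast?_eq_some_getLast hmne]
  exact congrArg (Option.getD · "") (congrArg some (List.getLast_map hmne))

-- no earlier key equals the last key, from Nodup of the keys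
theorem dropLast_keys_ne (l : List (String × Int)) (hne : l ≠ [])
    (hnd : (l.map Prod.fst).Nodup) :
    ∀ kv ∈ l.dropLast, kv.1 ≠ (l.getLast hne).1 := by
  intro kv hkv heq
  have hmne : l.map Prod.fst ≠ [] := by simpa using hne
  have hsplit : l.map Prod.fst = (l.map Prod.fst).dropLast ++ [(l.map Prod.fst).getLast hmne] :=
    (List.dropLast_append_getLast hmne).symm
  have hnd2 := hsplit ▸ hnd
  have hdisj := (List.nodup_append.1 hnd2).2.2
  have hmem : kv.1 ∈ (l.map Prod.fst).dropLast := by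
    rw [← List.map_dropLast]
    exact List.mem_map_of_mem hkv
  have hlast : (l.getLast hne).1 = (l.map Prod.fst).getLast hmne :=
    (List.getLast_map hmne).symm
  exact hdisj kv.1 hmem ((l.map Prod.fst).getLast hmne) (by simp) (heq.trans hlast)

-- ===== VERDICT (by name: the statement is the Claim_ definition above) =====
theorem form_result_spec : Claim_equal_form_result := by
  intro factors _ hpre
  obtain ⟨hne, hnd⟩ := hpre
  show form_result factors = form_result_alt factors
  simp only [form_result, form_result_alt]
  rw [lastFactor_eq factors hne,
    foldlA_eq factors "" _ hne rfl (dropLast_keys_ne factors hne hnd)]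
  cases factors with
  | nil => exact absurd rfl hne
  | cons x xs =>
      simp only [List.map_cons, List.drop_succ_cons, List.drop_zero]
      rw [foldlB_eq]
      simp [formJoin_cons, PySem.List.pyGet?, PySem.List.pyIdx?]
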